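-- pv_equiv track=rewrite | github.com/Emrelic/EczAsist | stok_hareket_analiz_gui.py | _bos_gruplari_temizle
-- ===== SOURCE A (Python) =====
-- def _bos_gruplari_temizle(veriler):
--     """Veri satırı olmayan grup başlıklarını ve alt toplamlarını kaldır"""
--     sonuc = []
--     i = 0
--     while i < len(veriler):
--         veri = veriler[i]
--         if veri.get('satir_tipi') == 'grup_baslik':
--             # Bu grubun veri satırları var mı kontrol et
--             grup_verileri = []
--             j = i + 1
--             while j < len(veriler) and veriler[j].get('satir_tipi') != 'grup_baslik':
--                 if veriler[j].get('satir_tipi') in ['giris', 'cikis']: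
--                     grup_verileri.append(veriler[j])
--                 j += 1
--
--             # Grup verisi varsa ekle
--             if grup_verileri:
--                 sonuc.append(veri)  # Grup başlığı
--                 for gv in grup_verileri:
--                     sonuc.append(gv)
--                 # Alt toplamları da ekle
--                 k = i + 1
--                 while k < len(veriler) and veriler[k].get('satir_tipi') != 'grup_baslik':
--                     if veriler[k].get('satir_tipi') == 'alt_toplam':
--                         sonuc.append(veriler[k])
--                     k += 1
--             i = j
--         else:
--             sonuc.append(veri)
--             i += 1
--
--     return sonuc
-- ===== SOURCE B (Python) =====
-- def _bos_gruplari_temizle(veriler):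
--     """Single accumulating pass: keep a current group (header, data rows, subtotals),
--     flush it on the next header / at the end, and drop it if it has no data rows."""
--     sonuc = []
--     cur = None  # (header, data_rows, subtotals) of the group being read
--     for v in veriler:
--         t = v.get('satir_tipi')
--         if t == 'grup_baslik':
--             if cur is not None:
--                 h, ds, ss = cur
--                 if ds:
--                     sonuc.append(h)
--                     sonuc.extend(ds)
--                     sonuc.extend(ss)
--             cur = (v, [], [])
--         elif cur is None:
--             sonuc.append(v)
--         elif t in ('giris', 'cikis'):
--             cur[1].append(v)
--         elif t == 'alt_toplam':
--             cur[2].append(v)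
--     if cur is not None:
--         h, ds, ss = cur
--         if ds:
--             sonuc.append(h)
--             sonuc.extend(ds)
--             sonuc.extend(ss)
--     return sonuc
-- ===== Notes on version B (the rewrite author's own statement) =====
-- stated objective: alternative
-- what changed: Replaced A's per-header pair of nested re-scans of the following rows (one collecting giris/cikis, one collecting alt_toplam) with a single accumulating pass that keeps the current group's header, data rows and subtotals and flushes the group at the next header or at end of input.
import Mathlib
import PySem

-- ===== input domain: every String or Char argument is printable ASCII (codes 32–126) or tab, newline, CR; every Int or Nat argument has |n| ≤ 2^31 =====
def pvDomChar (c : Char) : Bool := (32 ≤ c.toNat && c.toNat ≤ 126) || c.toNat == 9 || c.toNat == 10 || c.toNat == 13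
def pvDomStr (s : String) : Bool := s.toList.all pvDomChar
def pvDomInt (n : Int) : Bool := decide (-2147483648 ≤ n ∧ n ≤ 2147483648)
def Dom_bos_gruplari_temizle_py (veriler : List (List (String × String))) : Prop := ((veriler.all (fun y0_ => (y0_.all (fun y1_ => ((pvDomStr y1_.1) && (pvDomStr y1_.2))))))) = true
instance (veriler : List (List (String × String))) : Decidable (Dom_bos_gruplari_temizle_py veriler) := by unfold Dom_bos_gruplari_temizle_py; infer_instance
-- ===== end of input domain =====

-- B is one accumulating pass (header + data rows + subtotals of the current group, flushed at the
-- next header / the end) instead of A's two nested re-scans per group segment; return values are identical.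

-- ===== PORT A =====
-- veri.get('satir_tipi'): first-match lookup in the association list (Python dict get)
def pvTipi (v : List (String × String)) : Option String :=
  (v.find? (fun p => p.1 == "satir_tipi")).map (·.2)

-- inner 'while j' loop: collect giris/cikis rows until the next grup_baslik; also returns the
-- remaining suffix starting at that header (the 'i = j' continuation point)
def pvScanJ : List (List (String × String)) → List (List (String × String)) × List (List (String × String))
  | [] => ([], [])
  | r :: rs =>
    if pvTipi r = some "grup_baslik" then ([], r :: rs)
    else
      let (g, rem) := pvScanJ rs
      (if pvTipi r = some "giris" ∨ pvTipi r = some "cikis" then r :: g else g, rem)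

-- inner 'while k' loop: collect alt_toplam rows until the next grup_baslik
def pvScanK : List (List (String × String)) → List (List (String × String))
  | [] => []
  | r :: rs =>
    if pvTipi r = some "grup_baslik" then []
    else (if pvTipi r = some "alt_toplam" then [r] else []) ++ pvScanK rs

theorem pvScanJ_rem_len (l : List (List (String × String))) : (pvScanJ l).2.length ≤ l.length := by
  induction l with
  | nil => simp [pvScanJ]
  | cons r rs ih =>
    simp only [pvScanJ]
    split
    · simp
    · simpa using Nat.le_succ_of_le ih

-- outer 'while i' loop, recursion on the suffix veriler[i:]
def pvLoopA : List (List (String × String)) → List (List (String × String))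
  | [] => []
  | v :: rest =>
    if pvTipi v = some "grup_baslik" then
      (if (pvScanJ rest).1 ≠ [] then v :: ((pvScanJ rest).1 ++ pvScanK rest) else []) ++ pvLoopA (pvScanJ rest).2
    else v :: pvLoopA rest
  termination_by l => l.length
  decreasing_by
    · exact Nat.lt_succ_of_le (pvScanJ_rem_len rest)
    · simp

def bos_gruplari_temizle_py (veriler : List (List (String × String))) : List (List (String × String)) :=
  pvLoopA veriler

-- ===== PORT B =====
-- flush of the current group: emitted only if it has data rows
def pvFlushB (cur : Option (List (String × String) × List (List (String × String)) × List (List (String × String))))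
    (sonuc : List (List (String × String))) : List (List (String × String)) :=
  match cur with
  | none => sonuc
  | some (h, ds, ss) => if ds = [] then sonuc else sonuc ++ h :: (ds ++ ss)

def pvStepB (st : List (List (String × String)) × Option (List (String × String) × List (List (String × String)) × List (List (String × String))))
    (v : List (String × String)) :
    List (List (String × String)) × Option (List (String × String) × List (List (String × String)) × List (List (String × String))) :=
  let t := pvTipi v
  if t = some "grup_baslik" then (pvFlushB st.2 st.1, some (v, [], []))
  else
    match st.2 with
    | none => (st.1 ++ [v], none)
    | some (h, ds, ss) =>
      if t = some "giris" ∨ t = some "cikis" then (st.1, some (h, ds ++ [v], ss))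
      else if t = some "alt_toplam" then (st.1, some (h, ds, ss ++ [v]))
      else (st.1, some (h, ds, ss))

def bos_gruplari_temizle_py_alt (veriler : List (List (String × String))) : List (List (String × String)) :=
  let st := veriler.foldl pvStepB ([], none)
  pvFlushB st.2 st.1

-- ===== PRECONDITION & SPEC =====
def Spec_bos_gruplari_temizle_py (veriler : List (List (String × String))) (out : List (List (String × String))) : Prop := out = bos_gruplari_temizle_py_alt veriler
instance (veriler : List (List (String × String))) (out : List (List (String × String))) : Decidable (Spec_bos_gruplari_temizle_py veriler out) := by unfold Spec_bos_gruplari_temizle_py; infer_instance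

-- ===== CLAIM (what is proved, stated in full; the proofs are below) =====
def Claim_equal_bos_gruplari_temizle_py : Prop := ∀ (veriler : List (List (String × String))), Dom_bos_gruplari_temizle_py veriler → Spec_bos_gruplari_temizle_py veriler (bos_gruplari_temizle_py veriler)

-- ===== LEMMAS AND PROOFS =====

-- while in a group, B's fold matches A's header-branch output
theorem pv_group_lemma : ∀ (l : List (List (String × String))) (s : List (List (String × String)))
    (h : List (String × String)) (ds ss : List (List (String × String))),
    pvFlushB (l.foldl pvStepB (s, some (h, ds, ss))).2 (l.foldl pvStepB (s, some (h, ds, ss))).1 =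
      (if ds ++ (pvScanJ l).1 ≠ [] then s ++ h :: ((ds ++ (pvScanJ l).1) ++ (ss ++ pvScanK l)) else s)
        ++ pvLoopA (pvScanJ l).2 := by
  intro l
  induction l with
  | nil => intro s h ds ss; by_cases hds : ds = [] <;> simp [pvScanJ, pvScanK, pvLoopA, pvFlushB, hds]
  | cons r rs ih =>
    intro s h ds ss
    by_cases hb : pvTipi r = some "grup_baslik"
    · rw [List.foldl_cons,
        show pvStepB (s, some (h, ds, ss)) r = (pvFlushB (some (h, ds, ss)) s, some (r, [], [])) from by
          simp [pvStepB, hb],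
        ih]
      simp only [pvScanJ, pvScanK, hb, if_pos, pvLoopA, pvFlushB]
      by_cases hds : ds = [] <;> by_cases hg : (pvScanJ rs).1 = [] <;>
        simp [hds, hg, List.append_assoc]
    · by_cases hgc : pvTipi r = some "giris" ∨ pvTipi r = some "cikis"
      · rw [List.foldl_cons,
          show pvStepB (s, some (h, ds, ss)) r = (s, some (h, ds ++ [r], ss)) from by
            simp [pvStepB, hb, hgc],
          ih]
        have hk : pvScanK (r :: rs) = pvScanK rs := by
          rcases hgc with h1 | h1 <;> simp [pvScanK, h1]
        simp [pvScanJ, hb, hgc, hk, List.append_assoc]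
      · by_cases hat : pvTipi r = some "alt_toplam"
        · rw [List.foldl_cons,
            show pvStepB (s, some (h, ds, ss)) r = (s, some (h, ds, ss ++ [r])) from by
              simp [pvStepB, hat],
            ih]
          simp [pvScanJ, pvScanK, hat, List.append_assoc]
        · rw [List.foldl_cons,
            show pvStepB (s, some (h, ds, ss)) r = (s, some (h, ds, ss)) from by
              simp [pvStepB, hb, hgc, hat],
            ih]
          simp [pvScanJ, pvScanK, hb, hgc, hat]

-- before/outside any group, B's fold matches A's loop
theorem pv_none_lemma : ∀ (l : List (List (String × String))) (s : List (List (String × String))),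
    pvFlushB (l.foldl pvStepB (s, none)).2 (l.foldl pvStepB (s, none)).1 = s ++ pvLoopA l := by
  intro l
  induction l with
  | nil => intro s; simp [pvFlushB, pvLoopA]
  | cons r rs ih =>
    intro s
    by_cases hb : pvTipi r = some "grup_baslik"
    · rw [List.foldl_cons,
        show pvStepB (s, none) r = (s, some (r, [], [])) from by simp [pvStepB, hb, pvFlushB],
        pv_group_lemma]
      simp only [pvLoopA, hb, if_pos]
      by_cases hg : (pvScanJ rs).1 = [] <;> simp [hg, List.append_assoc]
    · rw [List.foldl_cons,
        show pvStepB (s, none) r = (s ++ [r], none) from by simp [pvStepB, hb],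
        ih]
      simp [pvLoopA, hb]

-- ===== VERDICT (by name: the statement is the Claim_ definition above) =====
theorem bos_gruplari_temizle_py_spec : Claim_equal_bos_gruplari_temizle_py := by
  intro veriler _
  unfold Spec_bos_gruplari_temizle_py bos_gruplari_temizle_py bos_gruplari_temizle_py_alt
  simpa using (pv_none_lemma veriler []).symm
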